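-- pv_equiv track=rewrite | github.com/PhilippCode1/BitgetKiTrading | shared/python/src/shared_py/market_data_quality.py | detect_duplicate_candles
-- ===== SOURCE A (Python) =====
-- def detect_duplicate_candles(candles: list[dict]) -> tuple[bool, list[str]]:
--     if not candles:
--         return False, ["candles_missing"]
--     seen: set[int] = set()
--     duplicates = 0
--     for row in candles:
--         ts = int(row.get("ts_ms") or 0)
--         if ts <= 0:
--             continue
--         if ts in seen:
--             duplicates += 1
--         seen.add(ts)
--     if duplicates == 0:
--         return True, []
--     if duplicates >= 2:
--         return False, ["candle_duplicates_critical"]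
--     return True, ["candle_duplicates_warning"]
-- ===== SOURCE B (Python) =====
-- def detect_duplicate_candles(candles: list[dict]) -> tuple[bool, list[str]]:
--     if not candles:
--         return False, ["candles_missing"]
--     valid = sorted(ts for ts in (int(row.get("ts_ms") or 0) for row in candles) if ts > 0)
--     duplicates = sum(1 for a, b in zip(valid, valid[1:]) if a == b)
--     if duplicates == 0:
--         return True, []
--     if duplicates >= 2:
--         return False, ["candle_duplicates_critical"]
--     return True, ["candle_duplicates_warning"]
-- ===== Notes on version B (the rewrite author's own statement) =====
-- stated objective: alternative
-- what changed: Replaces the hash-set membership loop by sort-then-scan: the positive timestamps are sorted and duplicates are counted as adjacent equal pairs, which equals A's incremental seen-set count because each value with k occurrences contributes k-1 adjacent equal pairs once sorted.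
import Mathlib
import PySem

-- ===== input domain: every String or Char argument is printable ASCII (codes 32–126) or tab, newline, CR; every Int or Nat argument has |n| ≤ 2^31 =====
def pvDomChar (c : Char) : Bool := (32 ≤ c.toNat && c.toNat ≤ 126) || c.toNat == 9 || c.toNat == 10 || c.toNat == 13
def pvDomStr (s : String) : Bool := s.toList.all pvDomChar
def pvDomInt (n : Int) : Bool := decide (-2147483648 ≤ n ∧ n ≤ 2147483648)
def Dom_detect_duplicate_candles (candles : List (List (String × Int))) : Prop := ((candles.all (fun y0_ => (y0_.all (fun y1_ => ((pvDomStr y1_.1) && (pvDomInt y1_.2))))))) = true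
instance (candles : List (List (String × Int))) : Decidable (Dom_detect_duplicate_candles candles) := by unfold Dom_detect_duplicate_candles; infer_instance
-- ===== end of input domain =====

-- B replaces A's hash-set membership loop by sort-then-scan: sort the positive
-- timestamps and count adjacent equal pairs (alternative algorithm, same result).

-- shared conversion: ts = int(row.get("ts_ms") or 0)  ('or 0' maps both None and 0 to 0)
def pvTsOf (row : List (String × Int)) : Int :=
  match (PySem.Dict.mk row).get? "ts_ms" with
  | none => 0
  | some v => if v = 0 then 0 else v

-- ===== PORT A =====
def detect_duplicate_candles (candles : List (List (String × Int))) : Bool × List String :=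
  if candles = [] then (false, ["candles_missing"])
  else
    let st := candles.foldl
      (fun (st : PySem.Set Int × Int) row =>
        let ts := pvTsOf row
        if ts ≤ 0 then st
        else
          let dups := if PySem.Set.contains st.1 ts then st.2 + 1 else st.2
          (PySem.Set.add st.1 ts, dups))
      (PySem.Set.empty, 0)
    let duplicates := st.2
    if duplicates = 0 then (true, [])
    else if duplicates ≥ 2 then (false, ["candle_duplicates_critical"])
    else (true, ["candle_duplicates_warning"])

-- ===== PORT B =====
-- sorted(filtered timestamps); duplicates = number of adjacent equal pairs (zip valid valid[1:])
def detect_duplicate_candles_alt (candles : List (List (String × Int))) : Bool × List String :=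
  if candles = [] then (false, ["candles_missing"])
  else
    let valid := PySem.List.sorted ((candles.map pvTsOf).filter (fun ts => 0 < ts)) (fun x => x) false
    let duplicates : Int :=
      ((valid.zip (PySem.List.slice valid (some 1) none)).countP (fun p => p.1 == p.2) : Int)
    if duplicates = 0 then (true, [])
    else if duplicates ≥ 2 then (false, ["candle_duplicates_critical"])
    else (true, ["candle_duplicates_warning"])

-- ===== PRECONDITION & SPEC =====
def Spec_detect_duplicate_candles (candles : List (List (String × Int))) (out : Bool × List String) : Prop := out = detect_duplicate_candles_alt candles
instance (candles : List (List (String × Int))) (out : Bool × List String) : Decidable (Spec_detect_duplicate_candles candles out) := by unfold Spec_detect_duplicate_candles; infer_instance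

-- ===== CLAIM =====
def Claim_equal_detect_duplicate_candles : Prop := ∀ (candles : List (List (String × Int))), Dom_detect_duplicate_candles candles → Spec_detect_duplicate_candles candles (detect_duplicate_candles candles)

-- ===== LEMMAS AND PROOFS =====

theorem pv_add_length (s : PySem.Set Int) (x : Int) :
    ((PySem.Set.add s x).length : Int) =
      if PySem.Set.contains s x then (s.length : Int) else (s.length : Int) + 1 := by
  unfold PySem.Set.add
  split_ifs with h <;> simp

-- A's loop state after processing l, started from (s, d)
theorem pv_loop_invariant (l : List (List (String × Int))) :
    ∀ (s : PySem.Set Int) (d : Int),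
      (l.foldl
        (fun (st : PySem.Set Int × Int) row =>
          let ts := pvTsOf row
          if ts ≤ 0 then st
          else
            let dups := if PySem.Set.contains st.1 ts then st.2 + 1 else st.2
            (PySem.Set.add st.1 ts, dups))
        (s, d)) =
      (PySem.Set.update s ((l.map pvTsOf).filter (fun ts => 0 < ts)),
       d + (((l.map pvTsOf).filter (fun ts => 0 < ts)).length : Int)
         - ((PySem.Set.update s ((l.map pvTsOf).filter (fun ts => 0 < ts))).length : Int)
         + (s.length : Int)) := by
  induction l with
  | nil => intro s d; simp [PySem.Set.update]
  | cons row rest ih =>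
    intro s d
    by_cases h : pvTsOf row ≤ 0
    · have h' : ¬ (0 < pvTsOf row) := by omega
      simp only [List.foldl_cons, List.map_cons, List.filter_cons, if_pos h, h', decide_false,
        Bool.false_eq_true, if_false]
      exact ih s d
    · have h' : (0 < pvTsOf row) := by omega
      simp only [List.foldl_cons, List.map_cons, List.filter_cons, if_neg h, h', decide_true,
        if_true]
      rw [ih]
      have hupd : PySem.Set.update s (pvTsOf row :: (rest.map pvTsOf).filter (fun ts => 0 < ts))
          = PySem.Set.update (PySem.Set.add s (pvTsOf row)) ((rest.map pvTsOf).filter (fun ts => 0 < ts)) := by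
        simp [PySem.Set.update]
      have hadd := pv_add_length s (pvTsOf row)
      refine Prod.ext ?_ ?_
      · simp [hupd]
      · simp only [hupd, List.length_cons]
        by_cases hc : PySem.Set.contains s (pvTsOf row)
        · rw [if_pos hc] at hadd
          simp only [hc, if_true]
          push_cast at hadd ⊢
          omega
        · rw [if_neg hc] at hadd
          simp only [hc, Bool.false_eq_true, if_false]
          push_cast at hadd ⊢
          omega

-- A's duplicates count in aggregate form
theorem pv_counts_eq (candles : List (List (String × Int))) :
    (candles.foldl
      (fun (st : PySem.Set Int × Int) row =>
        let ts := pvTsOf row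
        if ts ≤ 0 then st
        else
          let dups := if PySem.Set.contains st.1 ts then st.2 + 1 else st.2
          (PySem.Set.add st.1 ts, dups))
      (PySem.Set.empty, 0)).2 =
    (((candles.map pvTsOf).filter (fun ts => 0 < ts)).length : Int)
      - ((PySem.Set.ofList ((candles.map pvTsOf).filter (fun ts => 0 < ts))).length : Int) := by
  rw [pv_loop_invariant]
  simp [PySem.Set.ofList_eq_foldl, PySem.Set.update, PySem.Set.empty]

-- |set(xs)| = number of distinct elements
theorem pv_set_len (xs : List Int) :
    (PySem.Set.ofList xs).length = xs.toFinset.card := by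
  have hnd : (PySem.Set.ofList xs).Nodup := PySem.Set.nodup_ofList xs
  have hfs : (PySem.Set.ofList xs).toFinset = xs.toFinset := by
    ext a
    simp [PySem.Set.mem_ofList]
  calc (PySem.Set.ofList xs).length = (PySem.Set.ofList xs).toFinset.card :=
        (List.toFinset_card_of_nodup hnd).symm
    _ = xs.toFinset.card := by rw [hfs]

-- adjacent-equal pairs in a ≤-sorted list: count + distinct = length
theorem pv_adj_count (l : List Int) (hs : l.Pairwise (· ≤ ·)) :
    (l.zip l.tail).countP (fun p => p.1 == p.2) + l.toFinset.card = l.length := by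
  induction l with
  | nil => simp
  | cons a t ih =>
    cases t with
    | nil => simp
    | cons b t' =>
      have hs' : (b :: t').Pairwise (· ≤ ·) := hs.tail
      have hab : a ≤ b := (List.pairwise_cons.mp hs).1 b (by simp)
      by_cases hEq : a = b
      · subst hEq
        have := ih hs'
        simp only [List.zip_cons_cons, List.tail_cons, List.countP_cons, List.toFinset_cons,
          Finset.insert_idem, List.length_cons, beq_self_eq_true, if_pos] at *
        omega
      · have hnm : a ∉ (b :: t') := by
          intro hmem
          rcases List.mem_cons.mp hmem with h1 | h2
          · exact hEq h1
          · have hba : b ≤ a := (List.pairwise_cons.mp hs').1 a h2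
            exact hEq (le_antisymm hab hba)
        have hins : (insert a (b :: t').toFinset).card = (b :: t').toFinset.card + 1 :=
          Finset.card_insert_of_notMem (by simpa using hnm)
        have := ih hs'
        simp only [List.zip_cons_cons, List.tail_cons, List.countP_cons, List.toFinset_cons,
          List.length_cons] at *
        rw [hins] at *
        have hbeq : (a == b) = false := by simp [hEq]
        simp only [hbeq, Bool.false_eq_true, if_false] at *
        omega

-- B's duplicates count equals A's aggregate form
theorem pv_alt_count (xs : List Int) :
    (((PySem.List.sorted xs (fun x => x) false).zip
        (PySem.List.slice (PySem.List.sorted xs (fun x => x) false) (some 1) none)).countP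
        (fun p => p.1 == p.2) : Int)
      = (xs.length : Int) - ((PySem.Set.ofList xs).length : Int) := by
  set l := PySem.List.sorted xs (fun x => x) false with hl
  have hperm : l.Perm xs := PySem.List.sorted_perm xs _ _
  have hpw : l.Pairwise (· ≤ ·) := by
    simpa using PySem.List.sorted_pairwise xs (fun x => x)
  rw [PySem.List.slice_from_one]
  have hadj := pv_adj_count l hpw
  have hlen : l.length = xs.length := hperm.length_eq
  have hfin : l.toFinset = xs.toFinset := List.toFinset_eq_of_perm l xs hperm
  rw [pv_set_len]
  rw [hfin, hlen] at hadj
  have hcard : xs.toFinset.card ≤ xs.length := by omega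
  omega

-- ===== VERDICT =====
theorem detect_duplicate_candles_spec : Claim_equal_detect_duplicate_candles := by
  intro candles _
  unfold Spec_detect_duplicate_candles detect_duplicate_candles detect_duplicate_candles_alt
  by_cases h : candles = []
  · simp [h]
  · simp only [if_neg h]
    rw [pv_counts_eq, pv_alt_count]
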